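-- pv_equiv track=rewrite | github.com/csmile-1006/custom_openpi | examples/robocasa/scripts/robocasa_multieval_replan.py | calculate_episode_ranges
-- ===== SOURCE A (Python) =====
-- def calculate_episode_ranges(n_episodes: int, n_envs: int) -> list[tuple[int, int]]:
--     """각 환경별 episode 범위를 계산"""
--     episodes_per_env = n_episodes // n_envs
--     assert n_episodes % n_envs == 0, "n_episodes must be divisible by n_envs"
--
--     ranges = []
--     for env_idx in range(n_envs):
--         start_episode = env_idx * episodes_per_env
--         end_episode = start_episode + episodes_per_env
--         ranges.append((start_episode, end_episode))
--
--     return ranges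
-- ===== SOURCE B (Python) =====
-- def calculate_episode_ranges(n_episodes: int, n_envs: int) -> list[tuple[int, int]]:
--     """각 환경별 episode 범위를 계산"""
--     episodes_per_env = n_episodes // n_envs
--     assert n_episodes % n_envs == 0, "n_episodes must be divisible by n_envs"
--     boundaries = [i * episodes_per_env for i in range(n_envs + 1)]
--     return list(zip(boundaries[:-1], boundaries[1:]))
-- ===== Notes on version B (the rewrite author's own statement) =====
-- stated objective: alternative
-- what changed: B builds the full boundary table [0, e, 2e, ..., n*e] once and pairs adjacent boundaries with zip, instead of computing each (start, end) pair independently inside an accumulating loop.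
import Mathlib
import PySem

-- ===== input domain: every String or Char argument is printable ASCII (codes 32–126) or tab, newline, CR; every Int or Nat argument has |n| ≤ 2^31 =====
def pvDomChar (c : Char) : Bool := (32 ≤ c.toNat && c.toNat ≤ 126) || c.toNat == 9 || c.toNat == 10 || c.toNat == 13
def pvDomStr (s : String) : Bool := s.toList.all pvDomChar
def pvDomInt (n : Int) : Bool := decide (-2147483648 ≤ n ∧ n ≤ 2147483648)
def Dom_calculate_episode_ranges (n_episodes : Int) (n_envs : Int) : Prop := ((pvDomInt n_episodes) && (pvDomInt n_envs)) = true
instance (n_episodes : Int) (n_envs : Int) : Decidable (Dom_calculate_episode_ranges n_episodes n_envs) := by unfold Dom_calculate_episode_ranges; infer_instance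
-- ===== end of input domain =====

-- B builds the boundary table once and zips adjacent boundaries instead of an accumulating loop; alternative decomposition, same cost.


-- ===== PORT A =====
def calculate_episode_ranges (n_episodes : Int) (n_envs : Int) : List (Int × Int) :=
  let episodes_per_env := PySem.Int.floordiv n_episodes n_envs
  (PySem.List.pyRange 0 n_envs 1).foldl
    (fun ranges env_idx =>
      let start_episode := env_idx * episodes_per_env
      let end_episode := start_episode + episodes_per_env
      ranges ++ [(start_episode, end_episode)]) []

-- ===== PORT B =====
def calculate_episode_ranges_alt (n_episodes : Int) (n_envs : Int) : List (Int × Int) :=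
  let episodes_per_env := PySem.Int.floordiv n_episodes n_envs
  let boundaries := (PySem.List.pyRange 0 (n_envs + 1) 1).map (fun i => i * episodes_per_env)
  (PySem.List.slice boundaries none (some (-1))).zip (PySem.List.slice boundaries (some 1) none)

-- ===== PRECONDITION & SPEC =====
-- Pre_ excludes exactly the inputs where Python A raises: n_envs = 0 (ZeroDivisionError)
-- and n_episodes % n_envs ≠ 0 (AssertionError).
def Pre_calculate_episode_ranges (n_episodes : Int) (n_envs : Int) : Prop :=
  n_envs ≠ 0 ∧ PySem.Int.mod n_episodes n_envs = 0
instance (n_episodes : Int) (n_envs : Int) : Decidable (Pre_calculate_episode_ranges n_episodes n_envs) := by unfold Pre_calculate_episode_ranges; infer_instance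
def pvWitness_calculate_episode_ranges : Int × Int := (6, 3)

def Spec_calculate_episode_ranges (n_episodes : Int) (n_envs : Int) (out : List (Int × Int)) : Prop := out = calculate_episode_ranges_alt n_episodes n_envs
instance (n_episodes : Int) (n_envs : Int) (out : List (Int × Int)) : Decidable (Spec_calculate_episode_ranges n_episodes n_envs out) := by unfold Spec_calculate_episode_ranges; infer_instance

-- ===== CLAIM (what is proved, stated in full; the proofs are below) =====
def Claim_equal_calculate_episode_ranges : Prop := ∀ (n_episodes : Int) (n_envs : Int), Dom_calculate_episode_ranges n_episodes n_envs → Pre_calculate_episode_ranges n_episodes n_envs → Spec_calculate_episode_ranges n_episodes n_envs (calculate_episode_ranges n_episodes n_envs)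

-- ===== LEMMAS AND PROOFS =====

-- Adjacent pairs of a table over range (m+1) form a map over range m.
theorem zip_dropLast_tail_range {g : Nat → Int} (m : Nat) :
    ((List.range (m+1)).map g).dropLast.zip ((List.range (m+1)).map g).tail
      = (List.range m).map (fun k => (g k, g (k+1))) := by
  have hd : ((List.range (m+1)).map g).dropLast = (List.range m).map g := by
    rw [List.range_succ]; simp
  have ht : ((List.range (m+1)).map g).tail = (List.range m).map (fun k => g (k+1)) := by
    rw [List.range_succ_eq_map]; simp [List.map_map, Function.comp, Nat.succ_eq_add_one]
  rw [hd, ht, List.zip_map']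

-- A's accumulating loop is a map.
theorem foldl_append_singleton {α β : Type} (g : α → β) (l : List α) (init : List β) :
    l.foldl (fun acc x => acc ++ [g x]) init = init ++ l.map g := by
  induction l generalizing init with
  | nil => simp
  | cons a t ih => simp [List.foldl, ih]

theorem main_eq (n_episodes n_envs : Int) :
    calculate_episode_ranges n_episodes n_envs = calculate_episode_ranges_alt n_episodes n_envs := by
  unfold calculate_episode_ranges calculate_episode_ranges_alt
  set e := PySem.Int.floordiv n_episodes n_envs with he
  simp only [PySem.List.slice_to_neg_one, PySem.List.slice_from_one,
    foldl_append_singleton, List.nil_append]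
  by_cases h : n_envs ≤ 0
  · rw [PySem.List.pyRange_one_eq_nil (by omega)]
    by_cases h' : n_envs = 0
    · subst h'
      rw [show (0:Int) + 1 = 0 + 1 by ring, PySem.List.pyRange_one_singleton]
      simp
    · rw [PySem.List.pyRange_one_eq_nil (by omega)]; simp
  · replace h : 0 < n_envs := by omega
    rw [PySem.List.pyRange_one 0 n_envs, PySem.List.pyRange_one 0 (n_envs + 1)]
    have h1 : (n_envs + 1 - 0).toNat = (n_envs - 0).toNat + 1 := by omega
    rw [h1]
    set m := (n_envs - 0).toNat with hm
    simp only [List.map_map]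
    rw [zip_dropLast_tail_range m]
    apply List.map_congr_left
    intro k _
    simp only [Function.comp, Prod.mk.injEq]
    refine ⟨trivial, ?_⟩
    push_cast; ring

-- ===== VERDICT (by name: the statement is the Claim_ definition above) =====
theorem calculate_episode_ranges_spec : Claim_equal_calculate_episode_ranges := by
  intro n_episodes n_envs _ _
  exact main_eq n_episodes n_envs
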